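-- pv_equiv track=rewrite | github.com/stvnmbt/pasok | src/utils/password.py | is_password_complex
-- ===== SOURCE A (Python) =====
-- def is_password_complex(password):
--     # Add your password complexity requirements here
--     return (
--         len(password) >= 8 and
--         any(c.islower() for c in password) and
--         any(c.isupper() for c in password) and
--         any(c.isdigit() for c in password) and
--         any(c in "!@#$%^&*()-_=+{};:,<.>/?'" for c in password)
--     )
-- ===== SOURCE B (Python) =====
-- def is_password_complex(password):
--     has_lower = has_upper = has_digit = has_special = False
--     for c in password:
--         has_lower = has_lower or c.islower()
--         has_upper = has_upper or c.isupper()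
--         has_digit = has_digit or c.isdigit()
--         has_special = has_special or (c in "!@#$%^&*()-_=+{};:,<.>/?'")
--         if has_lower and has_upper and has_digit and has_special:
--             break
--     return len(password) >= 8 and has_lower and has_upper and has_digit and has_special
-- ===== Notes on version B (the rewrite author's own statement) =====
-- stated objective: alternative
-- what changed: Replaced four separate any() scans of the password with one stateful traversal maintaining four boolean flags and breaking early once all are set.
import Mathlib
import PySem

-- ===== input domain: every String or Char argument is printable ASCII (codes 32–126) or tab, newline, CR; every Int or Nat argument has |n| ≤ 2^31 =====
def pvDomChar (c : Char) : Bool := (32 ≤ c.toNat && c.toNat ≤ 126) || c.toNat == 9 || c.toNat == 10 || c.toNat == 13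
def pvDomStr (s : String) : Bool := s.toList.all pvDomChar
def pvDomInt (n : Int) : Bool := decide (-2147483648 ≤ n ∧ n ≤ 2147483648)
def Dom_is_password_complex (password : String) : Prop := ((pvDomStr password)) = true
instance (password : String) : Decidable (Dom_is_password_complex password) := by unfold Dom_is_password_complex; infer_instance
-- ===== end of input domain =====

-- B replaces A's four separate any() scans with one stateful traversal keeping four flags (early break); alternative decomposition, same cost.


-- ===== PORT A =====
-- the special-character set, as the Python string literal
def pvSpecials : List Char := "!@#$%^&*()-_=+{};:,<.>/?'".toList

def is_password_complex (password : String) : Bool :=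
  decide (PySem.Str.len password ≥ 8) &&
  password.toList.any PySem.Chars.islower &&
  password.toList.any PySem.Chars.isupper &&
  password.toList.any PySem.Chars.isdigit &&
  password.toList.any (fun c => pvSpecials.contains c)

-- ===== PORT B =====
-- the for-loop of Source B: carries the four flags, stops early once all are true
def pvScan : List Char → Bool → Bool → Bool → Bool → Bool × Bool × Bool × Bool
  | [], lo, up, di, sp => (lo, up, di, sp)
  | c :: cs, lo, up, di, sp =>
    let lo' := lo || PySem.Chars.islower c
    let up' := up || PySem.Chars.isupper c
    let di' := di || PySem.Chars.isdigit c
    let sp' := sp || pvSpecials.contains c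
    if lo' && up' && di' && sp' then (lo', up', di', sp')
    else pvScan cs lo' up' di' sp'

def is_password_complex_alt (password : String) : Bool :=
  let r := pvScan password.toList false false false false
  decide (PySem.Str.len password ≥ 8) && r.1 && r.2.1 && r.2.2.1 && r.2.2.2

-- ===== PRECONDITION & SPEC =====
def Spec_is_password_complex (password : String) (out : Bool) : Prop := out = is_password_complex_alt password
instance (password : String) (out : Bool) : Decidable (Spec_is_password_complex password out) := by unfold Spec_is_password_complex; infer_instance

-- ===== CLAIM (what is proved, stated in full; the proofs are below) =====
def Claim_equal_is_password_complex : Prop := ∀ (password : String), Dom_is_password_complex password → Spec_is_password_complex password (is_password_complex password)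

-- ===== LEMMAS AND PROOFS =====
theorem pvScan_eq (cs : List Char) (lo up di sp : Bool) :
    pvScan cs lo up di sp =
      (lo || cs.any PySem.Chars.islower, up || cs.any PySem.Chars.isupper,
       di || cs.any PySem.Chars.isdigit, sp || cs.any (fun c => pvSpecials.contains c)) := by
  induction cs generalizing lo up di sp with
  | nil => simp [pvScan]
  | cons c cs ih =>
    simp only [pvScan, List.any_cons]
    split
    · rename_i h
      simp only [Bool.and_eq_true] at h
      obtain ⟨⟨⟨h1, h2⟩, h3⟩, h4⟩ := h
      simp only [Prod.mk.injEq, ← Bool.or_assoc, h1, h2, h3, h4]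
      simp
    · rw [ih]; simp [Bool.or_assoc]

-- ===== VERDICT (by name: the statement is the Claim_ definition above) =====
theorem is_password_complex_spec : Claim_equal_is_password_complex := by
  intro password _
  unfold Spec_is_password_complex is_password_complex is_password_complex_alt
  rw [pvScan_eq]
  simp [Bool.and_assoc]
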